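-- pv_equiv track=rewrite | github.com/FCoulombeau/fcoulombeau.github.io | cours/TD.7.Note.a.py | div11
-- ===== SOURCE A (Python) =====
-- def div11(n):
--     s = 0
--     i = 1
--     for k in str(abs(n))[-1::-1]:
--         k = int(k)
--         s = s+ i*k
--         i = -i
--     return s
-- ===== SOURCE B (Python) =====
-- def div11(n):
--     d = str(abs(n))
--     return sum(int(c) for c in d[-1::-2]) - sum(int(c) for c in d[-2::-2])
-- ===== Notes on version B (the rewrite author's own statement) =====
-- stated objective: simpler
-- what changed: Replaces the sign-toggling accumulator loop by two strided slices of the digit string (digits at even and at odd offsets from the right), summed separately and subtracted once.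
import Mathlib
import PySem

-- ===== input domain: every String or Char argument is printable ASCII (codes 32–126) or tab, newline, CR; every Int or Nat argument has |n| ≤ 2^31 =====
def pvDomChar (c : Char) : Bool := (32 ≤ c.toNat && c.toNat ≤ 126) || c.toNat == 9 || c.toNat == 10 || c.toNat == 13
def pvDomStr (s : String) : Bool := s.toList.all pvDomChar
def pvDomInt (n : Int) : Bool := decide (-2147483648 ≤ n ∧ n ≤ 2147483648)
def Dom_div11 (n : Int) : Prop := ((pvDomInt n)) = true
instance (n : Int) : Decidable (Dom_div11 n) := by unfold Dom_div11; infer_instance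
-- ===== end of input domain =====

-- B replaces A's sign-toggling accumulator loop by two strided slices of the digit
-- string (even and odd offsets from the right), summed separately and subtracted once.

-- int(k) for a single decimal-digit character k; exact on the digits of str(abs(n)),
-- the only characters either program applies it to
def pvDig (c : Char) : Int := (c.toNat : Int) - 48

-- ===== PORT A =====
def div11 (n : Int) : Int :=
  -- for k in str(abs(n))[-1::-1]: k = int(k); s = s + i*k; i = -i
  let r := (PySem.List.slice? (PySem.Int.toStr |n|).toList (some (-1)) none (-1)).getD []
  (r.foldl (fun (si : Int × Int) k => (si.1 + si.2 * pvDig k, -si.2)) (0, 1)).1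

-- ===== PORT B =====
def div11_alt (n : Int) : Int :=
  let d := (PySem.Int.toStr |n|).toList
  let ev := (PySem.List.slice? d (some (-1)) none (-2)).getD []
  let od := (PySem.List.slice? d (some (-2)) none (-2)).getD []
  (ev.map pvDig).sum - (od.map pvDig).sum

-- ===== PRECONDITION & SPEC =====
def Spec_div11 (n : Int) (out : Int) : Prop := out = div11_alt n
instance (n : Int) (out : Int) : Decidable (Spec_div11 n out) := by unfold Spec_div11; infer_instance

-- ===== CLAIM (what is proved, stated in full; the proofs are below) =====
def Claim_equal_div11 : Prop := ∀ (n : Int), Dom_div11 n → Spec_div11 n (div11 n)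

-- ===== LEMMAS AND PROOFS =====

-- elements at even / odd positions of a list
def pvEvens {α : Type} : List α → List α
  | [] => []
  | [a] => [a]
  | a :: _ :: t => a :: pvEvens t

def pvOdds {α : Type} : List α → List α
  | [] => []
  | _ :: t => pvEvens t

theorem pvEvens_cons {α : Type} (a : α) (l : List α) :
    pvEvens (a :: l) = a :: pvOdds l := by
  cases l <;> rfl

theorem pvEvens_length {α : Type} (l : List α) :
    (pvEvens l).length = (l.length + 1) / 2 := by
  induction l using pvEvens.induct <;> simp_all [pvEvens] <;> try omega

theorem pvOdds_length {α : Type} (l : List α) :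
    (pvOdds l).length = l.length / 2 := by
  cases l with
  | nil => simp [pvOdds]
  | cons a t => simp [pvOdds, pvEvens_length]

theorem pvEvens_getElem {α : Type} (l : List α) (i : Nat) (h : i < (pvEvens l).length)
    (h2 : 2 * i < l.length) : (pvEvens l)[i] = l[2 * i] := by
  induction l using pvEvens.induct generalizing i with
  | case1 => simp at h2
  | case2 a =>
      cases i with
      | zero => rfl
      | succ j => simp at h2
  | case3 a b t ih =>
      cases i with
      | zero => rfl
      | succ j =>
          have : 2 * (j + 1) = 2 * j + 1 + 1 := by omega
          simp only [pvEvens, this, List.getElem_cons_succ]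
          exact ih j (by simpa [pvEvens] using h) (by simp at h2 ⊢; omega)

theorem pvOdds_getElem {α : Type} (l : List α) (i : Nat) (h : i < (pvOdds l).length)
    (h2 : 2 * i + 1 < l.length) : (pvOdds l)[i] = l[2 * i + 1] := by
  cases l with
  | nil => simp at h2
  | cons a t =>
      simp only [pvOdds, List.getElem_cons_succ]
      exact pvEvens_getElem t i (by simpa [pvOdds] using h) (by simp at h2 ⊢; omega)

-- alternating digit sum, from the front of the (reversed) digit list
def pvAlt : List Char → Int
  | [] => 0
  | a :: t => pvDig a - pvAlt t

theorem foldl_pvAlt (r : List Char) (s i : Int) :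
    (r.foldl (fun (si : Int × Int) k => (si.1 + si.2 * pvDig k, -si.2)) (s, i)).1
      = s + i * pvAlt r := by
  induction r generalizing s i with
  | nil => simp [pvAlt]
  | cons a t ih => simp [List.foldl, pvAlt, ih]; ring

theorem evens_sub_odds (l : List Char) :
    ((pvEvens l).map pvDig).sum - ((pvOdds l).map pvDig).sum = pvAlt l := by
  induction l using pvEvens.induct with
  | case1 => simp [pvEvens, pvOdds, pvAlt]
  | case2 a => simp [pvEvens, pvOdds, pvAlt]
  | case3 a b t ih => simp [pvEvens, pvOdds, pvAlt, pvEvens_cons] at *; omega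

-- slice characterisations: xs[-1::-1] is reverse, xs[-1::-2] / xs[-2::-2] are the
-- even- / odd-position elements of the reverse
-- a slice with negative step, evaluated: filterMap over an index range becomes the target list
theorem pv_fm {α : Type} [Inhabited α] (xs tgt : List α) (g : Nat → Int) (cnt : Nat)
    (hlen : tgt.length = cnt)
    (hval : ∀ i, i < cnt → xs[(g i).toNat]? = some (tgt.getD i default)) :
    List.filterMap (fun k => xs[(g k).toNat]?) (List.range cnt) = tgt := by
  have h1 : List.filterMap (fun k => xs[(g k).toNat]?) (List.range cnt)
      = List.map (fun k => tgt.getD k default) (List.range cnt) := by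
    rw [← List.filterMap_eq_map]
    apply List.filterMap_congr
    intro k hk
    simp only [hval k (by simpa using hk)]; rfl
  rw [h1]
  apply List.ext_getElem (by simp [hlen])
  intro i h1 h2
  simp [List.getElem?_eq_getElem h2]

theorem slice_rev {α : Type} [Inhabited α] (xs : List α) :
    PySem.List.slice? xs (some (-1)) none (-1) = some xs.reverse := by
  unfold PySem.List.slice? PySem.List.sliceIndices
  norm_num
  by_cases h0 : 0 < xs.length
  · rw [if_pos h0]
    apply pv_fm
    · simp
    · intro i hi
      have e1 : (-1 + (xs.length : Int) + -(i : Int)).toNat = xs.length - 1 - i := by omega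
      have h2 : xs.length - 1 - i < xs.length := by omega
      have h3 : i < xs.reverse.length := by simpa using (by omega : i < xs.length)
      rw [e1, List.getElem?_eq_getElem h2, List.getD_eq_getElem _ _ h3,
        List.getElem_reverse]
  · rw [if_neg h0]
    have : xs = [] := List.eq_nil_of_length_eq_zero (by omega)
    simp [this]

theorem slice_ev {α : Type} [Inhabited α] (xs : List α) :
    PySem.List.slice? xs (some (-1)) none (-2) = some (pvEvens xs.reverse) := by
  unfold PySem.List.slice? PySem.List.sliceIndices
  norm_num
  by_cases h0 : 0 < xs.length
  · rw [if_pos h0,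
      show (((xs.length : Int) + 2 - 1) / 2).toNat = (xs.length + 1) / 2 from by
        rw [show ((xs.length : Int) + 2 - 1) = (((xs.length + 1 : Nat)) : Int) by push_cast; ring]
        norm_cast]
    apply pv_fm
    · rw [pvEvens_length]; simp
    · intro i hi
      have hiL : 2 * i < xs.length := by omega
      have e1 : (-1 + (xs.length : Int) + -(2 * (i : Int))).toNat = xs.length - 1 - 2 * i := by
        omega
      have h2 : xs.length - 1 - 2 * i < xs.length := by omega
      have h3 : i < (pvEvens xs.reverse).length := by rw [pvEvens_length]; simp; omega
      rw [e1, List.getElem?_eq_getElem h2, List.getD_eq_getElem _ _ h3,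
        pvEvens_getElem _ _ h3 (by simp; omega), List.getElem_reverse]
  · rw [if_neg h0]
    have : xs = [] := List.eq_nil_of_length_eq_zero (by omega)
    simp [this, pvEvens]

theorem slice_od {α : Type} [Inhabited α] (xs : List α) :
    PySem.List.slice? xs (some (-2)) none (-2) = some (pvOdds xs.reverse) := by
  unfold PySem.List.slice? PySem.List.sliceIndices
  norm_num
  by_cases h0 : 1 < xs.length
  · rw [if_pos h0, max_eq_left (by omega : (-1 : Int) ≤ -2 + (xs.length : Int)),
      show ((-2 + (xs.length : Int) + 1 + 2 - 1) / 2).toNat = xs.length / 2 from by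
        rw [show (-2 + (xs.length : Int) + 1 + 2 - 1) = ((xs.length : Nat) : Int) by ring]
        norm_cast]
    apply pv_fm
    · rw [pvOdds_length]; simp
    · intro i hi
      have hiL : 2 * i + 1 < xs.length := by omega
      have e1 : (-2 + (xs.length : Int) + -(2 * (i : Int))).toNat
          = xs.length - 1 - (2 * i + 1) := by omega
      have h2 : xs.length - 1 - (2 * i + 1) < xs.length := by omega
      have h3 : i < (pvOdds xs.reverse).length := by rw [pvOdds_length]; simp; omega
      rw [e1, List.getElem?_eq_getElem h2, List.getD_eq_getElem _ _ h3,
        pvOdds_getElem _ _ h3 (by simp; omega), List.getElem_reverse]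
  · rw [if_neg h0]
    match xs, (by omega : xs.length ≤ 1) with
    | [], _ => simp [pvOdds]
    | [a], _ => simp [pvOdds, pvEvens]

-- ===== VERDICT (by name: the statement is the Claim_ definition above) =====
theorem div11_spec : Claim_equal_div11 := by
  intro n _
  unfold Spec_div11 div11 div11_alt
  simp only [slice_rev, slice_ev, slice_od, Option.getD_some]
  rw [foldl_pvAlt, evens_sub_odds]
  ring
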